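-- pv_equiv track=rewrite | github.com/chetansahrudhai/leetcode | 3713_longestBalancedSubstring1.py | longestBalanced
-- ===== SOURCE A (Python) =====
-- def longestBalanced(s: str) -> int:
--     res = 0
--     n = len(s)
--     s = [ord(letter) - ord('a') for letter in s]
--     res = 0
--     for x in range(n):
--         if n - x <= res:
--             break
--         count = [0] * 26
--         unique = frequency = 0
--         for i in range(x, n):
--             j = s[i]
--             unique += count[j] == 0
--             count[j] += 1
--             if count[j] > frequency:
--                 frequency = count[j]
--             current = i - x + 1
--             if unique * frequency == current and current > res:
--                 res = current
--     return res
-- ===== SOURCE B (Python) =====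
-- def _absorb(count, unique, sq, j):
--     # add one occurrence of class j to the window state
--     c = count[j]
--     if c == 0:
--         unique += 1
--     sq += 2 * c + 1
--     count[j] = c + 1
--     return unique, sq
--
--
-- def longestBalanced(s: str) -> int:
--     # Scan window lengths from longest to shortest and return at the first hit; a
--     # fixed-length window slides in O(1) per step using the sum-of-squares criterion:
--     # a window of length L is balanced iff unique * sum(count^2) == L * L.
--     t = [ord(letter) - ord('a') for letter in s]
--     n = len(t)
--     for L in range(n, 0, -1):
--         count = [0] * 26
--         unique = 0
--         sq = 0
--         for j in t[:L]:
--             unique, sq = _absorb(count, unique, sq, j)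
--         if unique * sq == L * L:
--             return L
--         for x in range(1, n - L + 1):
--             j = t[x - 1]
--             c = count[j]
--             sq -= 2 * c - 1
--             count[j] = c - 1
--             if c - 1 == 0:
--                 unique -= 1
--             unique, sq = _absorb(count, unique, sq, t[x + L - 1])
--             if unique * sq == L * L:
--                 return L
--     return 0
-- ===== Notes on version B (the rewrite author's own statement) =====
-- stated objective: alternative
-- what changed: A expands a window from every start position keeping a running max of the unique*maxfreq test; B instead scans window lengths from longest to shortest, sliding a fixed-length window in O(1) per step and testing balance with the sum-of-squares criterion unique * sum(count^2) == L^2, returning at the first balanced window found.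
import Mathlib
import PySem

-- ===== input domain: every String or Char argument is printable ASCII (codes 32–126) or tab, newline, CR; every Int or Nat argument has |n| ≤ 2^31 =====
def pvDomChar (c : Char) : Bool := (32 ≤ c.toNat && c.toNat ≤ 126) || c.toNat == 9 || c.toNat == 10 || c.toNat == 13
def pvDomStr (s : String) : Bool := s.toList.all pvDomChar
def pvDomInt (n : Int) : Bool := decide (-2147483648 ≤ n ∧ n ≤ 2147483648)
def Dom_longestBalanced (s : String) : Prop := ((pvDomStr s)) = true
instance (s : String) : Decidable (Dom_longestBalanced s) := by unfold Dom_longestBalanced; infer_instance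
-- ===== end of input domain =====

-- B replaces A's expand-every-start scan (running max of unique*maxfreq) by a scan of window
-- lengths from longest to shortest, sliding a fixed-length window in O(1) per step with the
-- sum-of-squares balance criterion unique * Σ count² = L²; objective: alternative algorithm.

-- ===== PORT A =====
def lbClasses (s : String) : List Int :=
  s.toList.map (fun letter => (letter.toNat : Int) - 97)

def lbInnerA (t : List Int) (x : Nat) (res0 : Int) : Int :=
  ((PySem.List.pyRange (x : Int) (PySem.List.len t) 1).foldl
    (fun st i =>
      match st with
      | (count, unique, frequency, res) =>
        let j := PySem.List.pyGetD t i 0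
        let c0 := PySem.List.pyGetD count j 0
        let unique := unique + (if c0 == 0 then (1 : Int) else 0)
        let count := PySem.List.pySetD count j (c0 + 1)
        let frequency := if c0 + 1 > frequency then c0 + 1 else frequency
        let current := i - (x : Int) + 1
        let res := if unique * frequency == current && current > res then current else res
        (count, unique, frequency, res))
    (List.replicate 26 (0 : Int), 0, 0, res0)).2.2.2

def lbOuterA (t : List Int) (x : Nat) (res : Int) : Int :=
  if _h : x < t.length then
    if (t.length : Int) - (x : Int) ≤ res then res
    else lbOuterA t (x + 1) (lbInnerA t x res)
  else res
termination_by t.length - x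

def longestBalanced (s : String) : Int := lbOuterA (lbClasses s) 0 0

-- ===== PORT B =====
-- _absorb(count, unique, sq, j): add one occurrence of class j to the window state
def lbAddB (st : List Int × Int × Int) (j : Int) : List Int × Int × Int :=
  let c := PySem.List.pyGetD st.1 j 0
  let unique := if c == 0 then st.2.1 + 1 else st.2.1
  let sq := st.2.2 + 2 * c + 1
  (PySem.List.pySetD st.1 j (c + 1), unique, sq)

-- the 'for x in range(1, n - L + 1)' loop with its early 'return L' (as Bool)
def lbSlideB (t : List Int) (L : Nat) (st : List Int × Int × Int) (x : Nat) : Bool :=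
  if _h : x ≤ t.length - L then
    let j := PySem.List.pyGetD t ((x : Int) - 1) 0
    let c := PySem.List.pyGetD st.1 j 0
    let sq := st.2.2 - (2 * c - 1)
    let count := PySem.List.pySetD st.1 j (c - 1)
    let unique := if c - 1 == 0 then st.2.1 - 1 else st.2.1
    let st' := lbAddB (count, unique, sq) (PySem.List.pyGetD t ((x : Int) + (L : Int) - 1) 0)
    if st'.2.1 * st'.2.2 == (L : Int) * (L : Int) then true
    else lbSlideB t L st' (x + 1)
  else false
termination_by t.length - L + 1 - x

-- one pass for a fixed window length L (build t[:L], check, then slide)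
def lbCheckB (t : List Int) (L : Nat) : Bool :=
  let st := (PySem.List.slice t none (some (L : Int))).foldl lbAddB
    (List.replicate 26 (0 : Int), 0, 0)
  if st.2.1 * st.2.2 == (L : Int) * (L : Int) then true
  else lbSlideB t L st 1

-- 'for L in range(n, 0, -1)' with the early returns
def lbOuterB (t : List Int) : Nat → Int
  | 0 => 0
  | (L + 1) => if lbCheckB t (L + 1) then ((L + 1 : Nat) : Int) else lbOuterB t L

def longestBalanced_alt (s : String) : Int :=
  lbOuterB (lbClasses s) (lbClasses s).length

-- ===== PRECONDITION & SPEC =====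
-- Pre_ excludes exactly the inputs on which A raises IndexError: any character whose
-- class ord(c)-ord('a') falls outside Python's valid index range [-26, 25] for the
-- 26-slot count list, i.e. characters outside codes 71..122 ('G'..'z').
def Pre_longestBalanced (s : String) : Prop :=
  s.toList.all (fun c => decide (71 ≤ c.toNat) && decide (c.toNat ≤ 122)) = true

instance (s : String) : Decidable (Pre_longestBalanced s) := by
  unfold Pre_longestBalanced; infer_instance

def pvWitness_longestBalanced : String := "abcab"

def Spec_longestBalanced (s : String) (out : Int) : Prop := out = longestBalanced_alt s
instance (s : String) (out : Int) : Decidable (Spec_longestBalanced s out) := by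
  unfold Spec_longestBalanced; infer_instance

-- ===== CLAIM (what is proved, stated in full; the proofs are below) =====
def Claim_equal_longestBalanced : Prop :=
  ∀ (s : String), Dom_longestBalanced s → Pre_longestBalanced s →
    Spec_longestBalanced s (longestBalanced s)

-- ===== LEMMAS AND PROOFS =====

-- the slot of the 26-element count list that Python's indexing assigns to class j
def lbSlot (j : Int) : Nat := (j % 26).toNat

-- the window of length L starting at x, as a list of slots
def lbWin (u : List Nat) (x L : Nat) : List Nat := (u.drop x).take L

-- count list, distinct-slot count, max frequency, and sum of squared counts of a window
def lbCntL (w : List Nat) : List Int := (List.range 26).map (fun k => (w.count k : Int))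
def lbUq (w : List Nat) : Nat := ((Finset.range 26).filter (fun k => w.count k ≠ 0)).card
def lbFq (w : List Nat) : Nat := (Finset.range 26).sup (fun k => w.count k)
def lbSq (w : List Nat) : Nat := ∑ k ∈ Finset.range 26, (w.count k) ^ 2
def lbBal (w : List Nat) : Bool := lbUq w * lbFq w == w.length

-- 'some window of length L starting at or after x is balanced' (Bool, for Nat.findGreatest)
def lbP (u : List Nat) (x L : Nat) : Bool :=
  decide (0 < L) && ((List.range (u.length + 1)).any
    (fun x' => decide (x ≤ x') && decide (x' + L ≤ u.length) && lbBal (lbWin u x' L)))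

theorem lbP_iff (u : List Nat) (x L : Nat) :
    lbP u x L = true ↔ 0 < L ∧ ∃ x', x ≤ x' ∧ x' + L ≤ u.length ∧ lbBal (lbWin u x' L) = true := by
  unfold lbP
  simp only [Bool.and_eq_true, decide_eq_true_eq, List.any_eq_true, List.mem_range]
  constructor
  · rintro ⟨h1, x', -, ⟨h3, h4⟩, h5⟩; exact ⟨h1, x', h3, h4, h5⟩
  · rintro ⟨h1, x', h3, h4, h5⟩; exact ⟨h1, x', by omega, ⟨h3, h4⟩, h5⟩

-- Python's indexing of a 26-element list, for -26 ≤ j < 26, lands on slot (j % 26)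
theorem lbPyGetD26 {α : Type} (xs : List α) (h26 : xs.length = 26) (j : Int)
    (h1 : -26 ≤ j) (h2 : j < 26) (d : α) :
    PySem.List.pyGetD xs j d = xs.getD (lbSlot j) d := by
  unfold PySem.List.pyGetD PySem.List.pyGet? PySem.List.pyIdx? lbSlot
  split_ifs with ha hb hc
  · have : j.toNat = (j % 26).toNat := by omega
    simp [this, List.getD]
  · omega
  · have : xs.length - (-j).toNat = (j % 26).toNat := by omega
    simp [this, List.getD]
  · omega

theorem lbPySetD26 {α : Type} (xs : List α) (h26 : xs.length = 26) (j : Int)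
    (h1 : -26 ≤ j) (h2 : j < 26) (v : α) :
    PySem.List.pySetD xs j v = xs.set (lbSlot j) v := by
  unfold PySem.List.pySetD PySem.List.pySet? PySem.List.pyIdx? lbSlot
  split_ifs with ha hb hc
  · have : j.toNat = (j % 26).toNat := by omega
    simp [this]
  · omega
  · have : xs.length - (-j).toNat = (j % 26).toNat := by omega
    simp [this]
  · omega

theorem lbSlot_lt (j : Int) (h1 : -26 ≤ j) (h2 : j < 26) : lbSlot j < 26 := by
  unfold lbSlot; omega

theorem lbCntL_length (w : List Nat) : (lbCntL w).length = 26 := by simp [lbCntL]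

theorem lbCntL_getElem (w : List Nat) (k : Nat) (hk : k < 26) :
    (lbCntL w)[k]'(by simp [lbCntL_length, hk]) = (w.count k : Int) := by
  simp [lbCntL]

theorem lbCntL_getD (w : List Nat) (k : Nat) (hk : k < 26) :
    (lbCntL w).getD k 0 = (w.count k : Int) := by
  rw [List.getD_eq_getElem _ _ (by simp [lbCntL_length, hk]), lbCntL_getElem w k hk]

theorem lbPyGetD_cntL (w : List Nat) (j : Int) (h1 : -26 ≤ j) (h2 : j < 26) :
    PySem.List.pyGetD (lbCntL w) j 0 = (w.count (lbSlot j) : Int) := by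
  rw [lbPyGetD26 (lbCntL w) (lbCntL_length w) j h1 h2, lbCntL_getD w _ (lbSlot_lt j h1 h2)]

theorem lbPySetD_cntL (w : List Nat) (j : Int) (v : Int) (h1 : -26 ≤ j) (h2 : j < 26) :
    PySem.List.pySetD (lbCntL w) j v = (lbCntL w).set (lbSlot j) v :=
  lbPySetD26 (lbCntL w) (lbCntL_length w) j h1 h2 v

theorem lbCntL_append (w : List Nat) (j : Nat) (hj : j < 26) :
    lbCntL (w ++ [j]) = (lbCntL w).set j ((w.count j : Int) + 1) := by
  apply List.ext_getElem
  · simp [lbCntL_length]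
  · intro k hk _
    have hk26 : k < 26 := by simpa [lbCntL_length] using hk
    rw [List.getElem_set]
    by_cases h : k = j
    · subst h; simp [lbCntL, List.count_append]
    · have h' : j ≠ k := fun hh => h hh.symm
      simp [lbCntL, List.count_append, List.count_singleton, h']

theorem lbCntL_cons (w : List Nat) (j : Nat) (hj : j < 26) :
    lbCntL (j :: w) = (lbCntL w).set j ((w.count j : Int) + 1) := by
  rw [← lbCntL_append w j hj]
  unfold lbCntL
  apply List.map_congr_left
  intro k _
  simp [List.count_cons, List.count_append]

theorem lbCntL_set_self (w : List Nat) (j : Nat) (hj : j < 26) :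
    (lbCntL w).set j (w.count j : Int) = lbCntL w := by
  conv_lhs => rw [← lbCntL_getElem w j hj]
  exact List.set_getElem_self (by simp [lbCntL_length, hj])

theorem lbUq_append (w : List Nat) (j : Nat) (hj : j < 26) :
    lbUq (w ++ [j]) = lbUq w + (if w.count j = 0 then 1 else 0) := by
  unfold lbUq
  have hset : (Finset.range 26).filter (fun k => (w ++ [j]).count k ≠ 0)
      = insert j ((Finset.range 26).filter (fun k => w.count k ≠ 0)) := by
    ext k
    simp only [Finset.mem_filter, Finset.mem_insert, Finset.mem_range, List.count_append,
      List.count_singleton]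
    by_cases h : k = j
    · subst h; simp [hj]
    · simp [h]; intro _; omega
  rw [hset]
  by_cases h0 : w.count j = 0
  · rw [Finset.card_insert_of_notMem (by simp [h0]), if_pos h0]
  · rw [Finset.insert_eq_self.2 (by simp [hj, h0]), if_neg h0]
    omega

theorem lbUq_cons (w : List Nat) (j : Nat) (hj : j < 26) :
    lbUq (j :: w) = lbUq w + (if w.count j = 0 then 1 else 0) := by
  rw [← lbUq_append w j hj]
  unfold lbUq
  congr 1
  apply Finset.filter_congr
  intro k _
  simp [List.count_cons, List.count_append]

theorem lbFq_append (w : List Nat) (j : Nat) (hj : j < 26) :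
    lbFq (w ++ [j]) = max (lbFq w) (w.count j + 1) := by
  unfold lbFq
  apply le_antisymm
  · apply Finset.sup_le
    intro k hk
    have hs : w.count k ≤ (Finset.range 26).sup (fun k => w.count k) :=
      Finset.le_sup (f := fun k => w.count k) hk
    simp only [List.count_append, List.count_singleton, beq_iff_eq]
    by_cases h : j = k
    · subst h; rw [if_pos rfl]; omega
    · rw [if_neg h]; omega
  · apply max_le
    · apply Finset.sup_mono_fun
      intro k _
      simp [List.count_append]
    · have hc : (w ++ [j]).count j = w.count j + 1 := by simp [List.count_append]
      rw [← hc]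
      exact Finset.le_sup (f := fun k => (w ++ [j]).count k) (Finset.mem_range.2 hj)

theorem lbSq_append (w : List Nat) (j : Nat) (hj : j < 26) :
    lbSq (w ++ [j]) = lbSq w + 2 * w.count j + 1 := by
  unfold lbSq
  have hjr : j ∈ Finset.range 26 := Finset.mem_range.2 hj
  rw [← Finset.sum_erase_add _ _ hjr, ← Finset.sum_erase_add (f := fun k => (w.count k)^2) _ hjr]
  have he : ∑ k ∈ (Finset.range 26).erase j, ((w ++ [j]).count k) ^ 2
      = ∑ k ∈ (Finset.range 26).erase j, (w.count k) ^ 2 := by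
    apply Finset.sum_congr rfl
    intro k hk
    have hne : j ≠ k := fun hh => (Finset.mem_erase.1 hk).1 hh.symm
    simp [List.count_append, List.count_singleton, hne]
  rw [he]
  have : (w ++ [j]).count j = w.count j + 1 := by simp [List.count_append]
  rw [this]; ring

theorem lbSq_cons (w : List Nat) (j : Nat) (hj : j < 26) :
    lbSq (j :: w) = lbSq w + 2 * w.count j + 1 := by
  rw [← lbSq_append w j hj]
  unfold lbSq
  apply Finset.sum_congr rfl
  intro k _
  simp [List.count_cons, List.count_append]

theorem lbSum_count (w : List Nat) (hw : ∀ j ∈ w, j < 26) :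
    ∑ k ∈ Finset.range 26, w.count k = w.length := by
  induction w with
  | nil => simp
  | cons j w ih =>
    have hj : j < 26 := hw j List.mem_cons_self
    have ihw := ih (fun a ha => hw a (List.mem_cons_of_mem _ ha))
    simp only [List.count_cons]
    rw [Finset.sum_add_distrib, ihw]
    simp [Finset.sum_ite_eq' (Finset.range 26) j, hj]

theorem lbWin_length (u : List Nat) (x L : Nat) (h : x + L ≤ u.length) :
    (lbWin u x L).length = L := by
  simp [lbWin]; omega

theorem lbWin_succ (u : List Nat) (x d : Nat) (h : x + d < u.length) :
    lbWin u x (d + 1) = lbWin u x d ++ [u[x + d]'(by omega)] := by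
  unfold lbWin
  rw [List.take_succ]
  congr 1
  have hd : d < (u.drop x).length := by simp; omega
  rw [List.getElem?_eq_getElem hd]
  simp [List.getElem_drop]

theorem lbWin_cons (u : List Nat) (x L : Nat) (hx : x < u.length) (hL : 0 < L) :
    lbWin u x L = u[x]'hx :: lbWin u (x + 1) (L - 1) := by
  obtain ⟨L', rfl⟩ : ∃ L', L = L' + 1 := ⟨L - 1, by omega⟩
  unfold lbWin
  rw [List.drop_eq_getElem_cons hx, List.take_succ_cons]
  simp

theorem lbWin_mem (u : List Nat) (x L : Nat) (hu : ∀ j ∈ u, j < 26) :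
    ∀ j ∈ lbWin u x L, j < 26 := by
  intro j hj
  exact hu j (List.mem_of_mem_drop (List.mem_of_mem_take hj))

theorem lbCrit (w : List Nat) (hw : ∀ j ∈ w, j < 26) :
    lbUq w * lbSq w = w.length * w.length ↔ lbBal w = true := by
  rw [lbBal, beq_iff_eq]
  set D := (Finset.range 26).filter (fun k => w.count k ≠ 0) with hD
  set u := D.card with hu
  set len := w.length with hlen
  have hsum : ∑ k ∈ D, w.count k = len := by
    rw [hD, Finset.sum_filter_of_ne (fun x _ h => h)]
    exact lbSum_count w hw
  have hsq : ∑ k ∈ D, (w.count k) ^ 2 = lbSq w := by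
    refine Finset.sum_subset (Finset.filter_subset _ _) (fun x hx hnx => ?_)
    have : w.count x = 0 := by
      by_contra h
      exact hnx (Finset.mem_filter.2 ⟨hx, h⟩)
    simp [this]
  have hA : (u * lbFq w = len) ↔ (∀ k ∈ D, u * w.count k = len) := by
    constructor
    · intro h k hk
      have hle : ∀ k ∈ D, w.count k ≤ lbFq w := by
        intro k hk
        exact Finset.le_sup (f := fun k => w.count k) (Finset.mem_filter.1 hk).1
      have heq : ∀ k ∈ D, w.count k = lbFq w := by
        by_contra hc
        push_neg at hc
        obtain ⟨k0, hk0, hne⟩ := hc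
        have hlt : ∑ k ∈ D, w.count k < ∑ _k ∈ D, lbFq w :=
          Finset.sum_lt_sum hle ⟨k0, hk0, lt_of_le_of_ne (hle k0 hk0) hne⟩
        rw [hsum, Finset.sum_const, smul_eq_mul, ← hu] at hlt
        omega
      rw [heq k hk]; exact h
    · intro hK
      rcases Finset.eq_empty_or_nonempty D with he | ⟨k0, hk0⟩
      · have hz : ∀ k ∈ Finset.range 26, w.count k = 0 := by
          intro k hk
          by_contra hnz
          exact absurd (Finset.mem_filter.2 ⟨hk, hnz⟩) (by rw [← hD, he]; simp)
        have hF : lbFq w = 0 := Nat.le_zero.1 (Finset.sup_le (fun k hk => le_of_eq (hz k hk)))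
        have hl : len = 0 := by rw [← hsum, he]; simp
        rw [hF, hl]; ring
      · have hupos : 0 < u := Finset.card_pos.2 ⟨k0, hk0⟩
        have hFeq : lbFq w = w.count k0 := by
          apply le_antisymm
          · apply Finset.sup_le
            intro k hk
            by_cases hkD : k ∈ D
            · exact le_of_eq (Nat.eq_of_mul_eq_mul_left hupos ((hK k hkD).trans (hK k0 hk0).symm))
            · have : w.count k = 0 := by
                by_contra hnz
                exact hkD (Finset.mem_filter.2 ⟨hk, hnz⟩)
              omega
          · exact Finset.le_sup (f := fun k => w.count k) (Finset.mem_filter.1 hk0).1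
        rw [hFeq]; exact hK k0 hk0
  have hsumZ : ∑ k ∈ D, (w.count k : ℤ) = (len : ℤ) := by
    rw [← Nat.cast_sum, hsum]
  have hsqZ : ∑ k ∈ D, ((w.count k : ℤ)) ^ 2 = (lbSq w : ℤ) := by
    rw [← hsq, Nat.cast_sum]
    push_cast
    ring
  have hid : ∑ k ∈ D, ((u : ℤ) * (w.count k : ℤ) - (len : ℤ)) ^ 2
      = (u : ℤ) * ((u : ℤ) * (lbSq w : ℤ) - (len : ℤ) * (len : ℤ)) := by
    have e1 : ∀ k ∈ D, ((u : ℤ) * (w.count k : ℤ) - (len : ℤ)) ^ 2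
        = (u : ℤ)^2 * (w.count k : ℤ)^2 - 2 * (u : ℤ) * (len : ℤ) * (w.count k : ℤ) + (len : ℤ)^2 := by
      intro k _; ring
    rw [Finset.sum_congr rfl e1, Finset.sum_add_distrib, Finset.sum_sub_distrib,
      ← Finset.mul_sum, ← Finset.mul_sum, Finset.sum_const, nsmul_eq_mul, hsumZ, hsqZ, ← hu]
    ring
  have hB : (u * lbSq w = len * len) ↔ (∀ k ∈ D, u * w.count k = len) := by
    constructor
    · intro h
      have hz : ∑ k ∈ D, ((u : ℤ) * (w.count k : ℤ) - (len : ℤ)) ^ 2 = 0 := by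
        rw [hid]
        have : (u : ℤ) * (lbSq w : ℤ) = (len : ℤ) * (len : ℤ) := by exact_mod_cast h
        rw [this]; ring
      intro k hk
      have := (Finset.sum_eq_zero_iff_of_nonneg (fun k _ => sq_nonneg _)).1 hz k hk
      have : (u : ℤ) * (w.count k : ℤ) = (len : ℤ) := by
        have h2 := pow_eq_zero_iff (n := 2) (by omega) |>.1 this
        linarith [h2]
      exact_mod_cast this
    · intro hK
      have hz : ∑ k ∈ D, ((u : ℤ) * (w.count k : ℤ) - (len : ℤ)) ^ 2 = 0 := by
        apply Finset.sum_eq_zero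
        intro k hk
        have : (u : ℤ) * (w.count k : ℤ) = (len : ℤ) := by exact_mod_cast hK k hk
        rw [this]; ring
      rw [hid] at hz
      rcases mul_eq_zero.1 hz with h0 | h1
      · have hu0 : u = 0 := by exact_mod_cast h0
        have hD0 : D = ∅ := Finset.card_eq_zero.1 hu0
        have hl : len = 0 := by rw [← hsum, hD0]; simp
        rw [hu0, hl]
        simp
      · have : (u : ℤ) * (lbSq w : ℤ) = (len : ℤ) * (len : ℤ) := by linarith
        exact_mod_cast this
  exact hB.trans hA.symm

theorem lbCntL_nil : lbCntL [] = List.replicate 26 (0 : Int) := by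
  simp [lbCntL]

theorem lbUq_nil : lbUq [] = 0 := by simp [lbUq]
theorem lbFq_nil : lbFq [] = 0 := by simp [lbFq]

theorem lbInnerA_aux (t : List Int) (ht : ∀ j ∈ t, -26 ≤ j ∧ j < 26)
    (x : Nat) (res0 : Int) (hres : 0 ≤ res0) (m : Nat) (hxm : x ≤ m) (hmn : m ≤ t.length) :
    ((PySem.List.pyRange (x : Int) (m : Int) 1).foldl
      (fun st i =>
        match st with
        | (count, unique, frequency, res) =>
          let j := PySem.List.pyGetD t i 0
          let c0 := PySem.List.pyGetD count j 0
          let unique := unique + (if c0 == 0 then (1 : Int) else 0)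
          let count := PySem.List.pySetD count j (c0 + 1)
          let frequency := if c0 + 1 > frequency then c0 + 1 else frequency
          let current := i - (x : Int) + 1
          let res := if unique * frequency == current && current > res then current else res
          (count, unique, frequency, res))
      (List.replicate 26 (0 : Int), 0, 0, res0))
    = (lbCntL (lbWin (t.map lbSlot) x (m - x)),
       (lbUq (lbWin (t.map lbSlot) x (m - x)) : Int),
       (lbFq (lbWin (t.map lbSlot) x (m - x)) : Int),
       max res0 (((Nat.findGreatest
         (fun L => 0 < L ∧ lbBal (lbWin (t.map lbSlot) x L) = true) (m - x) : Nat)) : Int)) := by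
  induction m, hxm using Nat.le_induction with
  | base =>
    rw [PySem.List.pyRange_one_eq_nil (by omega)]
    simp only [List.foldl_nil, Nat.sub_self]
    rw [lbWin]
    simp only [List.take_zero, lbCntL_nil, lbUq_nil, lbFq_nil, Nat.findGreatest_zero]
    have : max res0 ((0 : Nat) : Int) = res0 := by simp; omega
    rw [this]
    norm_num
  | succ m hxm ih =>
    have hmn' : m ≤ t.length := by omega
    have hm : m < t.length := by omega
    have hcast : ((m : Nat) + 1 : Int) = ((m + 1 : Nat) : Int) := by push_cast; ring
    rw [show ((m + 1 : Nat) : Int) = (m : Int) + 1 by push_cast; ring,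
      PySem.List.pyRange_one_succ_right (by exact_mod_cast Nat.cast_le.2 hxm),
      List.foldl_append, ih hmn']
    -- now reduce the single step
    set u := t.map lbSlot with hu
    have hun : u.length = t.length := by simp [hu]
    set W := lbWin u x (m - x) with hW
    have hjmem : t[m] ∈ t := List.getElem_mem hm
    obtain ⟨hj1, hj2⟩ := ht t[m] hjmem
    have hslot : lbSlot t[m] < 26 := lbSlot_lt _ hj1 hj2
    have hum : u[m]'(by omega) = lbSlot t[m] := by simp [hu]
    have hWsucc : lbWin u x (m - x + 1) = W ++ [lbSlot t[m]] := by
      rw [hW, ← hum]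
      have := lbWin_succ u x (m - x) (by omega)
      rw [this]
      have hidx : x + (m - x) = m := by omega
      congr 1
      simp [hidx]
    have hWlen : (lbWin u x (m - x + 1)).length = m - x + 1 :=
      lbWin_length u x (m - x + 1) (by omega)
    have hWlen' : (W ++ [lbSlot t[m]]).length = m - x + 1 := by
      rw [← hWsucc]; exact hWlen
    simp only [List.foldl_cons, List.foldl_nil]
    have hget : PySem.List.pyGetD t ((m : Nat) : Int) 0 = t[m] := by
      rw [PySem.List.pyGetD_natCast, List.getD_eq_getElem _ _ hm]
    rw [hget, lbPyGetD_cntL W t[m] hj1 hj2, lbPySetD_cntL W t[m] _ hj1 hj2]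
    set c := W.count (lbSlot t[m]) with hc
    set J := Nat.findGreatest
      (fun L => 0 < L ∧ lbBal (lbWin u x L) = true) (m - x) with hJ
    have hJle : J ≤ m - x := Nat.findGreatest_le _
    have hsplit : m + 1 - x = (m - x) + 1 := by omega
    have hcnt : (lbCntL W).set (lbSlot t[m]) ((c : Int) + 1) = lbCntL (lbWin u x (m + 1 - x)) := by
      rw [hsplit, hWsucc, lbCntL_append W _ hslot]
    have huq : (lbUq W : Int) + (if ((c : Int) == 0) then (1:Int) else 0)
        = (lbUq (lbWin u x (m + 1 - x)) : Int) := by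
      rw [hsplit, hWsucc, lbUq_append W _ hslot, ← hc]
      by_cases h0 : c = 0
      · simp [h0]
      · have : ((c : Int) == 0) = false := by simp [h0]
        simp [this, h0]
    have hfq : (if (c : Int) + 1 > (lbFq W : Int) then (c : Int) + 1 else (lbFq W : Int))
        = (lbFq (lbWin u x (m + 1 - x)) : Int) := by
      rw [hsplit, hWsucc, lbFq_append W _ hslot, ← hc]
      by_cases h : (lbFq W : Int) < (c : Int) + 1
      · rw [if_pos h]
        have : max (lbFq W) (c + 1) = c + 1 := by omega
        rw [this]; push_cast; ring
      · rw [if_neg h]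
        have : max (lbFq W) (c + 1) = lbFq W := by omega
        rw [this]
    rw [hcnt, huq, hfq]
    refine congrArg _ (congrArg _ (congrArg _ ?_))
    -- the res component
    have hcur : ((m : Nat) : Int) - (x : Int) + 1 = ((m + 1 - x : Nat) : Int) := by omega
    have hbal_iff : (lbBal (lbWin u x (m + 1 - x)) = true)
        ↔ ((lbUq (lbWin u x (m + 1 - x)) : Int) * (lbFq (lbWin u x (m + 1 - x)) : Int)
            = ((m + 1 - x : Nat) : Int)) := by
      rw [lbBal, beq_iff_eq]
      rw [hsplit, hWsucc, hWlen']
      constructor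
      · intro h; exact_mod_cast h
      · intro h; exact_mod_cast h
    rw [hsplit, Nat.findGreatest_succ, hcur]
    by_cases hbal : lbBal (lbWin u x (m + 1 - x)) = true
    · have hP : (0 < m - x + 1 ∧ lbBal (lbWin u x (m - x + 1)) = true) := by
        refine ⟨by omega, ?_⟩
        rw [← hsplit]; exact hbal
      rw [if_pos hP]
      have hEq : ((lbUq (lbWin u x (m + 1 - x)) : Int) * (lbFq (lbWin u x (m + 1 - x)) : Int)
          == ((m + 1 - x : Nat) : Int)) = true := by
        rw [beq_iff_eq]; exact hbal_iff.1 hbal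
      rw [hsplit] at hEq ⊢
      rw [hEq]
      simp only [Bool.true_and]
      by_cases hgt : max res0 (J : Int) < ((m - x + 1 : Nat) : Int)
      · rw [if_pos (by simpa using hgt)]
        have h1 : (J : Int) ≤ ((m - x : Nat) : Int) := by exact_mod_cast hJle
        push_cast at hgt h1 ⊢
        omega
      · rw [if_neg (by simpa using hgt)]
        have h1 : (J : Int) ≤ ((m - x : Nat) : Int) := by exact_mod_cast hJle
        push_cast at hgt h1 ⊢
        omega
    · have hP : ¬ (0 < m - x + 1 ∧ lbBal (lbWin u x (m - x + 1)) = true) := by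
        rintro ⟨-, h⟩
        rw [← hsplit] at h
        exact hbal h
      rw [if_neg hP]
      have hEq : ((lbUq (lbWin u x (m + 1 - x)) : Int) * (lbFq (lbWin u x (m + 1 - x)) : Int)
          == ((m + 1 - x : Nat) : Int)) = false := by
        rw [beq_eq_false_iff_ne]
        intro h
        exact hbal (hbal_iff.2 h)
      rw [hsplit] at hEq ⊢
      rw [hEq]
      simp only [Bool.false_and, Bool.false_eq_true, if_false]
      rw [hJ]


theorem lbInnerA_eq (t : List Int) (ht : ∀ j ∈ t, -26 ≤ j ∧ j < 26)
    (x : Nat) (hx : x ≤ t.length) (res0 : Int) (hres : 0 ≤ res0) :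
    lbInnerA t x res0 =
      max res0 ((Nat.findGreatest
        (fun L => 0 < L ∧ lbBal (lbWin (t.map lbSlot) x L) = true) (t.length - x) : Nat) : Int) := by
  unfold lbInnerA
  rw [PySem.List.len_eq, lbInnerA_aux t ht x res0 hres t.length hx (le_refl _)]

theorem lbFindGreatest_pos_spec {P : Nat → Prop} [DecidablePred P] {n : Nat}
    (h : 0 < Nat.findGreatest P n) : P (Nat.findGreatest P n) := by
  have hne : ¬ (∀ m, 0 < m → m ≤ n → ¬ P m) := by
    intro hall
    have := Nat.findGreatest_eq_zero_iff.2 hall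
    omega
  push_neg at hne
  obtain ⟨m, hm0, hmn, hPm⟩ := hne
  exact Nat.findGreatest_spec hmn hPm

theorem lbGA_split (u : List Nat) (x : Nat) (hx : x < u.length) :
    Nat.findGreatest (fun L => lbP u x L = true) (u.length - x)
    = max (Nat.findGreatest (fun L => 0 < L ∧ lbBal (lbWin u x L) = true) (u.length - x))
          (Nat.findGreatest (fun L => lbP u (x + 1) L = true) (u.length - (x + 1))) := by
  apply le_antisymm
  · rcases Nat.eq_zero_or_pos (Nat.findGreatest (fun L => lbP u x L = true) (u.length - x)) with h0 | hpos
    · omega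
    · have hP := lbFindGreatest_pos_spec hpos
      rw [lbP_iff] at hP
      obtain ⟨hG0, x', hxx', hx'L, hbal⟩ := hP
      rcases Nat.eq_or_lt_of_le hxx' with rfl | hlt
      · refine le_max_of_le_left (Nat.le_findGreatest (by omega) ⟨hG0, hbal⟩)
      · refine le_max_of_le_right (Nat.le_findGreatest (by omega)
          ((lbP_iff u (x + 1) _).2 ⟨hG0, x', by omega, hx'L, hbal⟩))
  · apply max_le
    · rcases Nat.eq_zero_or_pos (Nat.findGreatest (fun L => 0 < L ∧ lbBal (lbWin u x L) = true) (u.length - x)) with h0 | hpos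
      · omega
      · have hP := lbFindGreatest_pos_spec hpos
        have hle := Nat.findGreatest_le (P := fun L => 0 < L ∧ lbBal (lbWin u x L) = true) (u.length - x)
        exact Nat.le_findGreatest (by omega)
          ((lbP_iff u x _).2 ⟨hP.1, x, le_refl x, by omega, hP.2⟩)
    · rcases Nat.eq_zero_or_pos (Nat.findGreatest (fun L => lbP u (x + 1) L = true) (u.length - (x + 1))) with h0 | hpos
      · omega
      · have hP := lbFindGreatest_pos_spec hpos
        rw [lbP_iff] at hP
        obtain ⟨hG0, x', hxx', hx'L, hbal⟩ := hP
        exact Nat.le_findGreatest (by omega)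
          ((lbP_iff u x _).2 ⟨hG0, x', by omega, hx'L, hbal⟩)

theorem lbOuterA_eq (t : List Int) (ht : ∀ j ∈ t, -26 ≤ j ∧ j < 26)
    (x : Nat) (hx : x ≤ t.length) (res : Int) (hres : 0 ≤ res) :
    lbOuterA t x res =
      max res ((Nat.findGreatest (fun L => lbP (t.map lbSlot) x L = true) (t.length - x) : Nat) : Int) := by
  obtain ⟨d, hd⟩ : ∃ d, t.length - x = d := ⟨_, rfl⟩
  induction d generalizing x res with
  | zero =>
    rw [lbOuterA, dif_neg (by omega : ¬ x < t.length), hd]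
    simp only [Nat.findGreatest_zero, Nat.cast_zero]
    omega
  | succ d ih =>
    have hxlt : x < t.length := by omega
    rw [lbOuterA, dif_pos hxlt]
    have hulen : (t.map lbSlot).length = t.length := by simp
    by_cases hbrk : (t.length : Int) - (x : Int) ≤ res
    · rw [if_pos hbrk]
      have hle : Nat.findGreatest (fun L => lbP (t.map lbSlot) x L = true) (t.length - x) ≤ t.length - x :=
        Nat.findGreatest_le _
      have : ((Nat.findGreatest (fun L => lbP (t.map lbSlot) x L = true) (t.length - x) : Nat) : Int) ≤ res := by
        have : ((t.length - x : Nat) : Int) ≤ res := by push_cast; omega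
        exact le_trans (by exact_mod_cast Nat.cast_le.2 hle) this
      omega
    · rw [if_neg hbrk]
      rw [lbInnerA_eq t ht x (by omega) res hres]
      have hres' : (0:Int) ≤ max res ((Nat.findGreatest
          (fun L => 0 < L ∧ lbBal (lbWin (t.map lbSlot) x L) = true) (t.length - x) : Nat) : Int) := by
        omega
      rw [ih (x + 1) (by omega) _ hres' (by omega)]
      have hsplit2 := lbGA_split (t.map lbSlot) x (by rw [hulen]; omega)
      rw [hulen] at hsplit2
      rw [hsplit2]
      push_cast [Nat.cast_max]
      omega

theorem lbSq_nil : lbSq [] = 0 := by simp [lbSq]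

theorem lbAddB_state (w : List Nat) (j : Int) (h1 : -26 ≤ j) (h2 : j < 26) :
    lbAddB (lbCntL w, ((lbUq w : Nat) : Int), ((lbSq w : Nat) : Int)) j
      = (lbCntL (w ++ [lbSlot j]), ((lbUq (w ++ [lbSlot j]) : Nat) : Int),
         ((lbSq (w ++ [lbSlot j]) : Nat) : Int)) := by
  have hs := lbSlot_lt j h1 h2
  unfold lbAddB
  dsimp only
  rw [lbPyGetD_cntL w j h1 h2, lbPySetD_cntL w j _ h1 h2]
  rw [← lbCntL_append w _ hs, lbUq_append w _ hs, lbSq_append w _ hs]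
  by_cases h0 : w.count (lbSlot j) = 0
  · have hb : ((w.count (lbSlot j) : Int) == 0) = true := by simp [h0]
    simp only [hb, if_true, if_pos h0]
    have e2 : ((lbUq w : Nat) : Int) + 1 = ((lbUq w + 1 : Nat) : Int) := by push_cast; ring
    have e3 : ((lbSq w : Nat) : Int) + 2 * ((w.count (lbSlot j) : Nat) : Int) + 1
        = ((lbSq w + 2 * w.count (lbSlot j) + 1 : Nat) : Int) := by push_cast; ring
    rw [e2, e3]
  · have hb : ((w.count (lbSlot j) : Int) == 0) = false := by simp [h0]
    simp only [hb, Bool.false_eq_true, if_false, if_neg h0]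
    have e3 : ((lbSq w : Nat) : Int) + 2 * ((w.count (lbSlot j) : Nat) : Int) + 1
        = ((lbSq w + 2 * w.count (lbSlot j) + 1 : Nat) : Int) := by push_cast; ring
    rw [e3]
    rfl

theorem lbFold_state (l : List Int) (hl : ∀ j ∈ l, -26 ≤ j ∧ j < 26) (w : List Nat) :
    l.foldl lbAddB (lbCntL w, ((lbUq w : Nat) : Int), ((lbSq w : Nat) : Int))
      = (lbCntL (w ++ l.map lbSlot), ((lbUq (w ++ l.map lbSlot) : Nat) : Int),
         ((lbSq (w ++ l.map lbSlot) : Nat) : Int)) := by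
  induction l generalizing w with
  | nil => rw [List.foldl_nil, List.map_nil, List.append_nil]
  | cons j l ih =>
    obtain ⟨h1, h2⟩ := hl j List.mem_cons_self
    rw [List.foldl_cons, lbAddB_state w j h1 h2,
      ih (fun a ha => hl a (List.mem_cons_of_mem _ ha)) (w ++ [lbSlot j])]
    have hl2 : w ++ [lbSlot j] ++ List.map lbSlot l = w ++ List.map lbSlot (j :: l) := by
      simp
    rw [hl2]

theorem lbSlideB_eq (t : List Int) (ht : ∀ j ∈ t, -26 ≤ j ∧ j < 26)
    (L : Nat) (hL1 : 0 < L) (hLn : L ≤ t.length) (x : Nat) (hx1 : 1 ≤ x)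
    (hxn : x - 1 ≤ t.length - L) :
    (lbSlideB t L (lbCntL (lbWin (t.map lbSlot) (x - 1) L),
       ((lbUq (lbWin (t.map lbSlot) (x - 1) L) : Nat) : Int),
       ((lbSq (lbWin (t.map lbSlot) (x - 1) L) : Nat) : Int)) x = true)
     ↔ ∃ x', x ≤ x' ∧ x' + L ≤ t.length ∧ lbBal (lbWin (t.map lbSlot) x' L) = true := by
  set u := t.map lbSlot with hu
  have hun : u.length = t.length := by simp [hu]
  have humem : ∀ j ∈ u, j < 26 := by
    intro j hj
    rw [hu] at hj
    obtain ⟨a, ha, rfl⟩ := List.mem_map.1 hj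
    exact lbSlot_lt a (ht a ha).1 (ht a ha).2
  obtain ⟨f, hf⟩ : ∃ f, t.length - L + 1 - x = f := ⟨_, rfl⟩
  induction f generalizing x with
  | zero =>
    have hg : ¬ x ≤ t.length - L := by omega
    rw [lbSlideB, dif_neg hg]
    simp only [Bool.false_eq_true, false_iff]
    rintro ⟨x', hxx', hx'L, -⟩
    omega
  | succ f ih =>
    by_cases hg : x ≤ t.length - L
    · have hx1n : x - 1 < t.length := by omega
      have hxL : x + L ≤ t.length := by omega
      have hxL1n : x + L - 1 < t.length := by omega
      rw [lbSlideB, dif_pos hg]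
      dsimp only
      have hj : PySem.List.pyGetD t ((x : Int) - 1) 0 = t[x - 1] := by
        have hc : (x : Int) - 1 = ((x - 1 : Nat) : Int) := by omega
        rw [hc, PySem.List.pyGetD_natCast, List.getD_eq_getElem _ _ hx1n]
      have hj2 : PySem.List.pyGetD t ((x : Int) + (L : Int) - 1) 0 = t[x + L - 1] := by
        have hc : (x : Int) + (L : Int) - 1 = ((x + L - 1 : Nat) : Int) := by omega
        rw [hc, PySem.List.pyGetD_natCast, List.getD_eq_getElem _ _ hxL1n]
      obtain ⟨hb1, hb2⟩ := ht t[x - 1] (List.getElem_mem hx1n)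
      obtain ⟨hb1', hb2'⟩ := ht t[x + L - 1] (List.getElem_mem hxL1n)
      have hs : lbSlot t[x - 1] < 26 := lbSlot_lt _ hb1 hb2
      have hs' : lbSlot t[x + L - 1] < 26 := lbSlot_lt _ hb1' hb2'
      have hum1 : u[x - 1]'(by omega) = lbSlot t[x - 1] := by simp [hu]
      have hum2 : u[x + L - 1]'(by omega) = lbSlot t[x + L - 1] := by simp [hu]
      have hcons : lbWin u (x - 1) L = lbSlot t[x - 1] :: lbWin u x (L - 1) := by
        rw [lbWin_cons u (x - 1) L (by omega) hL1, hum1]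
        congr 2
        omega
      have hcount : (lbWin u (x - 1) L).count (lbSlot t[x - 1])
          = (lbWin u x (L - 1)).count (lbSlot t[x - 1]) + 1 := by
        rw [hcons, List.count_cons_self]
      set cmid := (lbWin u x (L - 1)).count (lbSlot t[x - 1]) with hcmid
      have hgetc : PySem.List.pyGetD (lbCntL (lbWin u (x - 1) L)) t[x - 1] 0
          = ((cmid + 1 : Nat) : Int) := by
        rw [lbPyGetD_cntL _ _ hb1 hb2, hcount]
      -- the removal turns the state of window (x-1) into the state of the middle window
      have hcntmid : PySem.List.pySetD (lbCntL (lbWin u (x - 1) L)) t[x - 1]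
          (((cmid + 1 : Nat) : Int) - 1) = lbCntL (lbWin u x (L - 1)) := by
        rw [lbPySetD_cntL _ _ _ hb1 hb2, hcons, lbCntL_cons _ _ hs, ← hcmid, List.set_set]
        have : ((cmid + 1 : Nat) : Int) - 1 = ((cmid : Nat) : Int) := by push_cast; ring
        rw [this, hcmid, lbCntL_set_self _ _ hs]
      have huqmid : (if ((cmid + 1 : Nat) : Int) - 1 == 0
            then ((lbUq (lbWin u (x - 1) L) : Nat) : Int) - 1
            else ((lbUq (lbWin u (x - 1) L) : Nat) : Int))
          = ((lbUq (lbWin u x (L - 1)) : Nat) : Int) := by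
        rw [hcons, lbUq_cons _ _ hs, ← hcmid]
        by_cases h0 : cmid = 0
        · have hbq : (((cmid + 1 : Nat) : Int) - 1 == 0) = true := by simp [h0]
          rw [hbq, if_pos rfl]
          rw [if_pos h0]
          push_cast
          ring
        · have hbq : (((cmid + 1 : Nat) : Int) - 1 == 0) = false := by
            simp only [beq_eq_false_iff_ne]
            intro hcontra
            apply h0
            omega
          rw [hbq]
          simp only [Bool.false_eq_true, if_false]
          rw [if_neg h0, Nat.add_zero]
      have hsqmid : ((lbSq (lbWin u (x - 1) L) : Nat) : Int)
            - (2 * ((cmid + 1 : Nat) : Int) - 1)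
          = ((lbSq (lbWin u x (L - 1)) : Nat) : Int) := by
        rw [hcons, lbSq_cons _ _ hs, ← hcmid]
        push_cast
        ring
      have hW1 : lbWin u x (L - 1) ++ [lbSlot t[x + L - 1]] = lbWin u x L := by
        rw [← hum2]
        have h1 : x + (L - 1) < u.length := by omega
        have := lbWin_succ u x (L - 1) h1
        rw [show L - 1 + 1 = L by omega] at this
        rw [this]
        have hidx : x + (L - 1) = x + L - 1 := by omega
        simp only [hidx]
      have hW1len : (lbWin u x L).length = L := lbWin_length u x L (by omega)
      have hW1mem : ∀ j ∈ lbWin u x L, j < 26 := lbWin_mem u x L humem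
      have hcrit : ((((lbUq (lbWin u x L) : Nat) : Int) * ((lbSq (lbWin u x L) : Nat) : Int)
            == (L : Int) * (L : Int))) = (lbBal (lbWin u x L)) := by
        rcases Bool.eq_false_or_eq_true (lbBal (lbWin u x L)) with hb | hb
        · rw [hb, beq_iff_eq]
          have := (lbCrit _ hW1mem).2 hb
          rw [hW1len] at this
          exact_mod_cast this
        · rw [hb, beq_eq_false_iff_ne]
          intro hcontra
          have : lbUq (lbWin u x L) * lbSq (lbWin u x L) = (lbWin u x L).length * (lbWin u x L).length := by
            rw [hW1len]
            exact_mod_cast hcontra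
          rw [(lbCrit _ hW1mem).1 this] at hb
          exact absurd hb (by simp)
      rw [hj, hgetc, hcntmid, huqmid, hj2]
      rw [show ((lbSq (lbWin u (x-1) L) : Nat) : Int) - (2 * ((cmid + 1 : Nat) : Int) - 1)
          = ((lbSq (lbWin u x (L-1)) : Nat) : Int) from hsqmid]
      rw [lbAddB_state _ _ hb1' hb2', hW1]
      rw [hcrit]
      rcases Bool.eq_false_or_eq_true (lbBal (lbWin u x L)) with hbal | hbal
      · rw [hbal, if_pos rfl]
        constructor
        · intro _
          exact ⟨x, le_refl x, hxL, hbal⟩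
        · intro _
          rfl
      · rw [hbal]
        simp only [Bool.false_eq_true, if_false]
        have hrec := ih (x + 1) (by omega) (by omega) (by omega)
        rw [show x + 1 - 1 = x from rfl] at hrec
        constructor
        · intro h
          obtain ⟨x', h1, h2, h3⟩ := hrec.1 h
          exact ⟨x', by omega, h2, h3⟩
        · rintro ⟨x', h1, h2, h3⟩
          rcases Nat.eq_or_lt_of_le h1 with rfl | hlt
          · rw [hbal] at h3
            exact absurd h3 (by simp)
          · exact hrec.2 ⟨x', by omega, h2, h3⟩
    · rw [lbSlideB, dif_neg hg]
      simp only [Bool.false_eq_true, false_iff]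
      rintro ⟨x', hxx', hx'L, -⟩
      omega

theorem lbCheckB_eq (t : List Int) (ht : ∀ j ∈ t, -26 ≤ j ∧ j < 26)
    (L : Nat) (hL1 : 0 < L) (hLn : L ≤ t.length) :
    lbCheckB t L = true ↔
      ∃ x', x' + L ≤ t.length ∧ lbBal (lbWin (t.map lbSlot) x' L) = true := by
  set u := t.map lbSlot with hu
  have hun : u.length = t.length := by simp [hu]
  have humem : ∀ j ∈ u, j < 26 := by
    intro j hj
    rw [hu] at hj
    obtain ⟨a, ha, rfl⟩ := List.mem_map.1 hj
    exact lbSlot_lt a (ht a ha).1 (ht a ha).2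
  unfold lbCheckB
  rw [PySem.List.slice_to_natCast]
  have hinit : ((List.replicate 26 (0 : Int), (0 : Int), (0 : Int)) : List Int × Int × Int)
      = (lbCntL [], ((lbUq [] : Nat) : Int), ((lbSq [] : Nat) : Int)) := by
    simp only [lbCntL_nil, lbUq_nil, lbSq_nil, Nat.cast_zero]
  rw [hinit, lbFold_state (t.take L) (fun a ha => ht a (List.mem_of_mem_take ha)) [],
    List.nil_append]
  have hmap : (t.take L).map lbSlot = lbWin u 0 L := by
    rw [hu, List.map_take, lbWin, List.drop_zero]
  rw [hmap]
  dsimp only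
  have hW1len : (lbWin u 0 L).length = L := lbWin_length u 0 L (by omega)
  have hW1mem : ∀ j ∈ lbWin u 0 L, j < 26 := lbWin_mem u 0 L humem
  have hcrit : ((((lbUq (lbWin u 0 L) : Nat) : Int) * ((lbSq (lbWin u 0 L) : Nat) : Int)
        == (L : Int) * (L : Int))) = (lbBal (lbWin u 0 L)) := by
    rcases Bool.eq_false_or_eq_true (lbBal (lbWin u 0 L)) with hb | hb
    · rw [hb, beq_iff_eq]
      have := (lbCrit _ hW1mem).2 hb
      rw [hW1len] at this
      exact_mod_cast this
    · rw [hb, beq_eq_false_iff_ne]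
      intro hcontra
      have : lbUq (lbWin u 0 L) * lbSq (lbWin u 0 L)
          = (lbWin u 0 L).length * (lbWin u 0 L).length := by
        rw [hW1len]
        exact_mod_cast hcontra
      rw [(lbCrit _ hW1mem).1 this] at hb
      exact absurd hb (by simp)
  rw [hcrit]
  rcases Bool.eq_false_or_eq_true (lbBal (lbWin u 0 L)) with hbal | hbal
  · rw [hbal, if_pos rfl]
    constructor
    · intro _
      exact ⟨0, by omega, hbal⟩
    · intro _
      rfl
  · rw [hbal]
    simp only [Bool.false_eq_true, if_false]
    have hslide := lbSlideB_eq t ht L hL1 hLn 1 (le_refl 1) (by omega)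
    rw [show (1 : Nat) - 1 = 0 from rfl] at hslide
    constructor
    · intro h
      obtain ⟨x', h1, h2, h3⟩ := hslide.1 h
      exact ⟨x', h2, h3⟩
    · rintro ⟨x', h2, h3⟩
      rcases Nat.eq_zero_or_pos x' with rfl | hpos
      · rw [hbal] at h3
        exact absurd h3 (by simp)
      · exact hslide.2 ⟨x', by omega, h2, h3⟩

theorem lbOuterB_eq (t : List Int) (ht : ∀ j ∈ t, -26 ≤ j ∧ j < 26)
    (L : Nat) (hLn : L ≤ t.length) :
    lbOuterB t L = ((Nat.findGreatest (fun L' => lbP (t.map lbSlot) 0 L' = true) L : Nat) : Int) := by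
  have hun : (t.map lbSlot).length = t.length := by simp
  induction L with
  | zero => simp [lbOuterB]
  | succ L ih =>
    have hiff : lbCheckB t (L + 1) = true ↔ lbP (t.map lbSlot) 0 (L + 1) = true := by
      rw [lbP_iff, lbCheckB_eq t ht (L + 1) (by omega) (by omega)]
      constructor
      · rintro ⟨x', h2, h3⟩
        exact ⟨by omega, x', by omega, by omega, h3⟩
      · rintro ⟨-, x', -, h2, h3⟩
        exact ⟨x', by omega, h3⟩
    rw [lbOuterB, Nat.findGreatest_succ]
    by_cases hc : lbCheckB t (L + 1) = true
    · rw [if_pos hc, if_pos (hiff.1 hc)]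
    · rw [if_neg hc, if_neg (fun h => hc (hiff.2 h)), ih (by omega)]

-- ===== VERDICT (by name: the statement is the Claim_ definition above) =====
theorem longestBalanced_spec : Claim_equal_longestBalanced := by
  intro s _hdom hpre
  unfold Spec_longestBalanced
  have ht : ∀ j ∈ lbClasses s, -26 ≤ j ∧ j < 26 := by
    intro j hj
    unfold lbClasses at hj
    simp only [List.mem_map] at hj
    obtain ⟨c, hc, rfl⟩ := hj
    unfold Pre_longestBalanced at hpre
    rw [List.all_eq_true] at hpre
    have := hpre c hc
    simp only [Bool.and_eq_true, decide_eq_true_eq] at this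
    omega
  have hA := lbOuterA_eq (lbClasses s) ht 0 (by omega) 0 (by omega)
  have hB := lbOuterB_eq (lbClasses s) ht (lbClasses s).length (le_refl _)
  unfold longestBalanced longestBalanced_alt
  rw [hA, hB, Nat.sub_zero]
  omega
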